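-- pv_equiv track=rewrite | github.com/Enjef/Algo | 1300 - 1399/1318 - Minimum Flips to Make a OR b Equal to c/1318 - Minimum Flips to Make a OR b Equal to c.py | minFlips_best_speed
-- ===== SOURCE A (Python) =====
-- def minFlips_best_speed(a: int, b: int, c: int) -> int:
--     ans = 0
--     for i in range(32):
--         if c & (1 << i) == 0:
--             if a & (1 << i) and b & (1 << i):
--                 ans += 2
--             elif a & (1 << i) or b & (1 << i):
--                 ans += 1
--         elif c & (1 << i):
--             if a & (1 << i) == 0 and b & (1 << i) == 0:
--                 ans += 1
--     return ans
-- ===== SOURCE B (Python) =====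
-- def minFlips_best_speed(a: int, b: int, c: int) -> int:
--     mask = 0xFFFFFFFF
--     a32 = a & mask
--     b32 = b & mask
--     c32 = c & mask
--     return (bin(a32 & ~c32 & mask).count('1')
--             + bin(b32 & ~c32 & mask).count('1')
--             + bin(c32 & ~(a32 | b32) & mask).count('1'))
-- ===== Notes on version B (the rewrite author's own statement) =====
-- stated objective: simpler
-- what changed: Replaces the 32-iteration per-bit loop with a closed bitwise formula: mask a,b,c to 32 bits and sum three popcounts (bits of a and of b to clear where c is 0, plus bits to set where c is 1 but a|b is 0).
import Mathlib
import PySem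

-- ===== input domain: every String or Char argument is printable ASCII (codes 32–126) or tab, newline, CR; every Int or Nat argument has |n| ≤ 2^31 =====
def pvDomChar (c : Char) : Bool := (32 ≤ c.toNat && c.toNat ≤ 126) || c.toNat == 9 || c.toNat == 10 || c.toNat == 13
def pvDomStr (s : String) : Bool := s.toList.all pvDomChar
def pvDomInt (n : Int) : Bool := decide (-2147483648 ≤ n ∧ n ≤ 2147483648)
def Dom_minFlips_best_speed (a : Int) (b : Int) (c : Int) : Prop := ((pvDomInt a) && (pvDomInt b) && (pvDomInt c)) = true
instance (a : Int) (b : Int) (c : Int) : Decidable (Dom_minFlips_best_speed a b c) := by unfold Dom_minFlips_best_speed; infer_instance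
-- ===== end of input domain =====

-- B replaces A's 32-iteration per-bit loop by a closed bitwise formula (mask to 32 bits, three popcounts); equivalence is proved on |a|,|b|,|c| ≤ 2^31.

-- ===== PORT A =====
-- helper for Python's `1 << i` (i is the loop index, 0 ≤ i < 32)
def pvPow (i : Int) : Int := (1:Int) <<< i.toNat

def minFlips_best_speed (a : Int) (b : Int) (c : Int) : Int :=
  (PySem.List.pyRange 0 32 1).foldl (fun ans i =>
    if PySem.Int.band c (pvPow i) = 0 then
      if PySem.Int.band a (pvPow i) ≠ 0 ∧ PySem.Int.band b (pvPow i) ≠ 0 then ans + 2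
      else if PySem.Int.band a (pvPow i) ≠ 0 ∨ PySem.Int.band b (pvPow i) ≠ 0 then ans + 1
      else ans
    else
      if PySem.Int.band c (pvPow i) ≠ 0 then
        if PySem.Int.band a (pvPow i) = 0 ∧ PySem.Int.band b (pvPow i) = 0 then ans + 1
        else ans
      else ans) 0

-- ===== PORT B =====
-- bin(x).count('1') on the (nonnegative, masked) values is ported as PySem.Int.bitCount
def minFlips_best_speed_alt (a : Int) (b : Int) (c : Int) : Int :=
  let mask : Int := 4294967295
  let a32 := PySem.Int.band a mask
  let b32 := PySem.Int.band b mask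
  let c32 := PySem.Int.band c mask
  (PySem.Int.bitCount (PySem.Int.band (PySem.Int.band a32 (Int.not c32)) mask) : Int)
  + (PySem.Int.bitCount (PySem.Int.band (PySem.Int.band b32 (Int.not c32)) mask) : Int)
  + (PySem.Int.bitCount (PySem.Int.band (PySem.Int.band c32 (Int.not (PySem.Int.bor a32 b32))) mask) : Int)

-- ===== PRECONDITION & SPEC =====
def Spec_minFlips_best_speed (a : Int) (b : Int) (c : Int) (out : Int) : Prop := out = minFlips_best_speed_alt a b c
instance (a : Int) (b : Int) (c : Int) (out : Int) : Decidable (Spec_minFlips_best_speed a b c out) := by unfold Spec_minFlips_best_speed; infer_instance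

-- ===== CLAIM (what is proved, stated in full; the proofs are below) =====
def Claim_equal_minFlips_best_speed : Prop := ∀ (a : Int) (b : Int) (c : Int), Dom_minFlips_best_speed a b c → Spec_minFlips_best_speed a b c (minFlips_best_speed a b c)

-- ===== LEMMAS AND PROOFS =====

-- the 32-bit residue of a (two's-complement low 32 bits), as a natural number
def pvMaskNat (a : Int) : Nat := if 0 ≤ a then a.toNat else (a + 4294967296).toNat

-- per-iteration contribution of A's loop body
def pvG (a b c : Int) (i : Int) : Int :=
  if PySem.Int.band c (pvPow i) = 0 then
    if PySem.Int.band a (pvPow i) ≠ 0 ∧ PySem.Int.band b (pvPow i) ≠ 0 then 2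
    else if PySem.Int.band a (pvPow i) ≠ 0 ∨ PySem.Int.band b (pvPow i) ≠ 0 then 1
    else 0
  else
    if PySem.Int.band c (pvPow i) ≠ 0 then
      if PySem.Int.band a (pvPow i) = 0 ∧ PySem.Int.band b (pvPow i) = 0 then 1
      else 0
    else 0

-- per-bit contribution, expressed on the masked bits
def pvF (a b c : Int) (k : Nat) : Nat :=
  ((pvMaskNat a).testBit k && !(pvMaskNat c).testBit k).toNat
  + ((pvMaskNat b).testBit k && !(pvMaskNat c).testBit k).toNat
  + ((pvMaskNat c).testBit k && !((pvMaskNat a).testBit k || (pvMaskNat b).testBit k)).toNat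

theorem pv_not_eq (n : Int) : Int.not n = -n - 1 := by
  cases n with
  | ofNat m => show Int.negSucc m = _ ; simp [Int.negSucc_eq, Int.ofNat_eq_natCast] ; try ring
  | negSucc m => show (m : Int) = _ ; simp [Int.negSucc_eq] ; try ring

theorem pv_maskNat_lt (a : Int) (h1 : -2147483648 ≤ a) (h2 : a ≤ 2147483648) :
    pvMaskNat a < 4294967296 := by
  unfold pvMaskNat; split <;> omega

theorem pv_and_mask32 (x : Nat) (h : x < 4294967296) : x &&& 4294967295 = x := by
  have := Nat.and_two_pow_sub_one_eq_mod x 32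
  norm_num at this
  rw [this, Nat.mod_eq_of_lt h]

theorem pv_band_mask (a : Int) (h1 : -2147483648 ≤ a) (h2 : a ≤ 2147483648) :
    PySem.Int.band a 4294967295 = ((pvMaskNat a : Nat) : Int) := by
  have hM : (4294967295:Int).toNat = 4294967295 := rfl
  unfold PySem.Int.band pvMaskNat
  by_cases h : 0 ≤ a
  · rw [if_pos h, if_pos (by norm_num : (0:Int) ≤ 4294967295), if_pos h,
      hM, pv_and_mask32 a.toNat (by omega)]
  · rw [if_neg h, if_pos (by norm_num : (0:Int) ≤ 4294967295), if_neg h,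
      hM, Nat.and_comm, pv_and_mask32 (-a-1).toNat (by omega)]
    omega

theorem pv_band_pow (a : Int) (h1 : -2147483648 ≤ a) (h2 : a ≤ 2147483648) (k : Nat) (hk : k < 32) :
    (PySem.Int.band a (pvPow ↑k) ≠ 0) ↔ (pvMaskNat a).testBit k = true := by
  have hpow : pvPow ↑k = ((2 ^ k : Nat) : Int) := by
    unfold pvPow
    rw [Int.toNat_natCast, Int.shiftLeft_eq]
    push_cast
    ring
  have h32 : (2:Nat) ^ 32 = 4294967296 := by norm_num
  rw [hpow]
  unfold PySem.Int.band pvMaskNat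
  by_cases h : 0 ≤ a
  · rw [if_pos h, if_pos (by positivity), if_pos h, Int.toNat_natCast, Nat.and_two_pow]
    cases hb : a.toNat.testBit k <;> simp
  · rw [if_neg h, if_pos (by positivity), if_neg h, Int.toNat_natCast, Nat.and_comm, Nat.and_two_pow]
    have hm : (-a-1).toNat < 2 ^ 32 := by omega
    have hmask : (a + 4294967296).toNat = 2 ^ 32 - ((-a - 1).toNat + 1) := by omega
    rw [hmask, Nat.testBit_two_pow_sub_succ hm]
    cases hb : (-a-1).toNat.testBit k <;> simp [hk]

theorem pv_band_not (nx ny : Nat) :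
    PySem.Int.band (↑nx) (Int.not ↑ny) = ((nx - (nx &&& ny) : Nat) : Int) := by
  rw [pv_not_eq]
  unfold PySem.Int.band
  rw [if_pos (by positivity), if_neg (by omega)]
  have h1 : (-(-(ny:Int) - 1) - 1).toNat = ny := by omega
  rw [h1, Int.toNat_natCast]

theorem pv_band_mask_small (x : Nat) (h : x < 4294967296) :
    PySem.Int.band (↑x) 4294967295 = ((x : Nat) : Int) := by
  rw [PySem.Int.band_of_nonneg (by positivity) (by norm_num)]
  have hM : (4294967295:Int).toNat = 4294967295 := rfl
  rw [Int.toNat_natCast, hM, pv_and_mask32 x h]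

theorem pv_sub_eq_xor (m : Nat) : ∀ s : Nat, s &&& m = s → m - s = m ^^^ s := by
  induction m using Nat.strong_induction_on with
  | _ m ih =>
    intro s hs
    rcases Nat.eq_zero_or_pos m with hm | hm
    · subst hm
      have hz : s = 0 := by simpa using hs.symm
      subst hz
      simp
    · have h2 : (s / 2) &&& (m / 2) = s / 2 := by rw [← Nat.and_div_two, hs]
      have ihm := ih (m / 2) (by omega) (s / 2) h2
      have hb : s % 2 ≤ m % 2 := by
        have := congrArg (fun t => t.testBit 0) hs
        simp only [Nat.testBit_zero] at this
        rcases Nat.mod_two_eq_zero_or_one s with h | h <;>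
          rcases Nat.mod_two_eq_zero_or_one m with h' | h' <;> simp [h, h'] at this ⊢
      have hsle : s / 2 ≤ m / 2 := h2 ▸ Nat.and_le_right
      have hx2 : (m ^^^ s) / 2 = (m / 2) ^^^ (s / 2) := Nat.xor_div_two
      have hx1 : (m ^^^ s) % 2 = 1 ↔ ¬ (m % 2 = 1 ↔ s % 2 = 1) := by
        have := Nat.testBit_xor m s 0
        simp only [Nat.testBit_zero] at this
        rcases Nat.mod_two_eq_zero_or_one s with h | h <;>
          rcases Nat.mod_two_eq_zero_or_one m with h' | h' <;>
            simp [h, h'] at this ⊢ <;> omega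
      have hd1 := Nat.div_add_mod (m ^^^ s) 2
      have hd2 := Nat.div_add_mod m 2
      have hd3 := Nat.div_add_mod s 2
      rcases Nat.mod_two_eq_zero_or_one s with h | h <;>
        rcases Nat.mod_two_eq_zero_or_one m with h' | h' <;>
          rcases Nat.mod_two_eq_zero_or_one (m ^^^ s) with h'' | h'' <;>
            simp [h, h', h''] at hx1 <;> omega

theorem pv_testBit_sub (x y k : Nat) :
    (x - (x &&& y)).testBit k = (x.testBit k && !y.testBit k) := by
  have hsub : (x &&& y) &&& x = x &&& y := by
    apply Nat.eq_of_testBit_eq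
    intro i
    simp only [Nat.testBit_and]
    cases x.testBit i <;> cases y.testBit i <;> rfl
  rw [pv_sub_eq_xor x (x &&& y) hsub, Nat.testBit_xor, Nat.testBit_and]
  cases x.testBit k <;> cases y.testBit k <;> rfl

theorem pv_bitCount_eq (k : Nat) : ∀ x : Nat, x < 2 ^ k →
    PySem.Int.bitCount ↑x = ((List.range k).map (fun i => (x.testBit i).toNat)).sum := by
  induction k with
  | zero =>
    intro x hx
    have : x = 0 := by omega
    subst this
    simp
  | succ k ih =>
    intro x hx
    rcases Nat.eq_zero_or_pos x with h0 | h0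
    · subst h0
      simp [Nat.zero_testBit]
    · rw [PySem.Int.bitCount_natCast h0, ih (x / 2) (by omega),
        List.range_succ_eq_map, List.map_cons, List.sum_cons, List.map_map]
      have h0' : (x.testBit 0).toNat = x % 2 := by
        rw [Nat.testBit_zero]
        rcases Nat.mod_two_eq_zero_or_one x with h | h <;> simp [h]
      have hf : ((List.range k).map ((fun i => (x.testBit i).toNat) ∘ Nat.succ))
          = (List.range k).map (fun i => ((x / 2).testBit i).toNat) := by
        apply List.map_congr_left
        intro i _
        simp [Function.comp, Nat.succ_eq_add_one, Nat.testBit_add_one]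
      rw [hf, h0']

theorem pv_sum3 (l : List Nat) (f g h : Nat → Nat) :
    (l.map (fun k => f k + g k + h k)).sum = (l.map f).sum + (l.map g).sum + (l.map h).sum := by
  induction l with
  | nil => simp
  | cons x t ih => simp [ih]; omega

theorem pv_foldA (a b c : Int) : ∀ (l : List Int) (init : Int),
    l.foldl (fun ans i =>
      if PySem.Int.band c (pvPow i) = 0 then
        if PySem.Int.band a (pvPow i) ≠ 0 ∧ PySem.Int.band b (pvPow i) ≠ 0 then ans + 2
        else if PySem.Int.band a (pvPow i) ≠ 0 ∨ PySem.Int.band b (pvPow i) ≠ 0 then ans + 1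
        else ans
      else
        if PySem.Int.band c (pvPow i) ≠ 0 then
          if PySem.Int.band a (pvPow i) = 0 ∧ PySem.Int.band b (pvPow i) = 0 then ans + 1
          else ans
        else ans) init = init + (l.map (pvG a b c)).sum := by
  intro l
  induction l with
  | nil => intro init; simp
  | cons x t ih =>
    intro init
    simp only [List.foldl_cons, List.map_cons, List.sum_cons, ih]
    unfold pvG
    split_ifs <;> ring

theorem pv_band_pow_zero (a : Int) (h1 : -2147483648 ≤ a) (h2 : a ≤ 2147483648) (k : Nat) (hk : k < 32) :
    (PySem.Int.band a (pvPow ↑k) = 0) ↔ (pvMaskNat a).testBit k = false := by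
  have h := pv_band_pow a h1 h2 k hk
  cases hv : (pvMaskNat a).testBit k <;> simp [hv] at h ⊢ <;> tauto

theorem pv_pointwise (a b c : Int) (hDom : Dom_minFlips_best_speed a b c) (k : Nat) (hk : k < 32) :
    pvG a b c ↑k = ((pvF a b c k : Nat) : Int) := by
  unfold Dom_minFlips_best_speed pvDomInt at hDom
  simp only [Bool.and_eq_true, decide_eq_true_eq] at hDom
  obtain ⟨⟨ha, hb⟩, hc⟩ := hDom
  have hA := pv_band_pow a ha.1 ha.2 k hk
  have hB := pv_band_pow b hb.1 hb.2 k hk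
  have hC := pv_band_pow c hc.1 hc.2 k hk
  have hA0 := pv_band_pow_zero a ha.1 ha.2 k hk
  have hB0 := pv_band_pow_zero b hb.1 hb.2 k hk
  have hC0 := pv_band_pow_zero c hc.1 hc.2 k hk
  unfold pvG pvF
  cases hx : (pvMaskNat a).testBit k <;> cases hy : (pvMaskNat b).testBit k <;>
    cases hz : (pvMaskNat c).testBit k <;>
      simp [hA, hB, hC, hA0, hB0, hC0, hx, hy, hz]

theorem pv_cast_sum (l : List Nat) (f : Nat → Nat) :
    (l.map (fun k => ((f k : Nat) : Int))).sum = (((l.map f).sum : Nat) : Int) := by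
  induction l with
  | nil => simp
  | cons x t ih =>
    simp only [List.map_cons, List.sum_cons, ih]
    push_cast
    ring

-- ===== VERDICT (by name: the statement is the Claim_ definition above) =====
theorem minFlips_best_speed_spec : Claim_equal_minFlips_best_speed := by
  intro a b c hDom
  unfold Spec_minFlips_best_speed
  have hd := hDom
  unfold Dom_minFlips_best_speed pvDomInt at hd
  simp only [Bool.and_eq_true, decide_eq_true_eq] at hd
  obtain ⟨⟨ha, hb⟩, hc⟩ := hd
  have hA : minFlips_best_speed a b c
      = (((List.range 32).map (fun k => pvF a b c k)).sum : Nat) := by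
    unfold minFlips_best_speed
    rw [pv_foldA, PySem.List.pyRange_one]
    have h32' : ((32:Int)).toNat = 32 := rfl
    simp only [zero_add, sub_zero, h32', List.map_map]
    have hmap : (List.range 32).map (pvG a b c ∘ fun k : Nat => (k : Int))
        = (List.range 32).map (fun k => ((pvF a b c k : Nat) : Int)) := by
      apply List.map_congr_left
      intro k hkmem
      have hk : k < 32 := List.mem_range.mp hkmem
      simpa [Function.comp] using pv_pointwise a b c hDom k hk
    rw [hmap, pv_cast_sum]
  rw [hA]
  have h32 : (2:Nat) ^ 32 = 4294967296 := by norm_num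
  have hma := pv_maskNat_lt a ha.1 ha.2
  have hmb := pv_maskNat_lt b hb.1 hb.2
  have hmc := pv_maskNat_lt c hc.1 hc.2
  unfold minFlips_best_speed_alt
  dsimp only
  rw [pv_band_mask a ha.1 ha.2, pv_band_mask b hb.1 hb.2, pv_band_mask c hc.1 hc.2,
    PySem.Int.bor_natCast, pv_band_not, pv_band_not, pv_band_not,
    pv_band_mask_small _ (by omega), pv_band_mask_small _ (by omega),
    pv_band_mask_small _ (by omega),
    pv_bitCount_eq 32 _ (by omega), pv_bitCount_eq 32 _ (by omega),
    pv_bitCount_eq 32 _ (by omega)]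
  have r1 : (List.range 32).map (fun i => ((pvMaskNat a - (pvMaskNat a &&& pvMaskNat c)).testBit i).toNat)
      = (List.range 32).map (fun i => ((pvMaskNat a).testBit i && !(pvMaskNat c).testBit i).toNat) := by
    apply List.map_congr_left; intro i _; rw [pv_testBit_sub]
  have r2 : (List.range 32).map (fun i => ((pvMaskNat b - (pvMaskNat b &&& pvMaskNat c)).testBit i).toNat)
      = (List.range 32).map (fun i => ((pvMaskNat b).testBit i && !(pvMaskNat c).testBit i).toNat) := by
    apply List.map_congr_left; intro i _; rw [pv_testBit_sub]
  have r3 : (List.range 32).map (fun i => ((pvMaskNat c - (pvMaskNat c &&& (pvMaskNat a ||| pvMaskNat b))).testBit i).toNat)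
      = (List.range 32).map (fun i => ((pvMaskNat c).testBit i && !((pvMaskNat a).testBit i || (pvMaskNat b).testBit i)).toNat) := by
    apply List.map_congr_left; intro i _; rw [pv_testBit_sub, Nat.testBit_or]
  rw [r1, r2, r3]
  simp only [pvF]
  rw [pv_sum3]
  push_cast
  ring
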